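-- pv_equiv track=rewrite | github.com/jangchangwan/TIL | docs/05_swea/1000/1493_수의_새로운_연산/s1.py | x_y_sum
-- ===== SOURCE A (Python) =====
-- def x_y_sum(row, col):
--     if row == 1 and col == 1:
--         return 1
--     else:
--         i, j, cnt, res = 1, 1, 1, 1
--         while i != row:
--             i += 1
--             res += cnt
--             cnt += 1
--         cnt += 1
--         while j != col:
--             j += 1
--             res += cnt
--             cnt += 1
--         return res
-- ===== SOURCE B (Python) =====
-- def x_y_sum(row, col):
--     # value at (row, col): 1 + triangle walk down + walk right, in closed form
--     return 1 + row * (row - 1) // 2 + (col - 1) * (2 * row + col) // 2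
-- ===== Notes on version B (the rewrite author's own statement) =====
-- stated objective: faster
-- what changed: Replaced the two accumulation while-loops with closed-form arithmetic-series sums (one O(1) expression).
import Mathlib
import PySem

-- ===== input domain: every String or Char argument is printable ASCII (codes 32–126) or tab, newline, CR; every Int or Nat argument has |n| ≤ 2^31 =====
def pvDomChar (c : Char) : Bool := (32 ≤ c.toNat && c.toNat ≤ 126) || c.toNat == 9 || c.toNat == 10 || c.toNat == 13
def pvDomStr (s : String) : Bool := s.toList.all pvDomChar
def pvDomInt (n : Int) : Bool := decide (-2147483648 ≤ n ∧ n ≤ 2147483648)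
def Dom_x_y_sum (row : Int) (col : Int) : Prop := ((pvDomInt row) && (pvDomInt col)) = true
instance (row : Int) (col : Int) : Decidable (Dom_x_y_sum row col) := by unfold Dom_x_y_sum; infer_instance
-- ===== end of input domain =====

-- B replaces A's two accumulation while-loops by closed-form arithmetic-series sums (O(1)).


-- ===== PORT A =====
-- Python's `while i != row:` starting from i = 1: under Pre_ (1 ≤ row) the
-- condition `i != row` is equivalent to `i < row`; the `<` guard only makes
-- the recursion total (for target < i the Python loop diverges, excluded by Pre_).
-- The loop body is exactly Python's: i += 1; res += cnt; cnt += 1.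
def x_y_sum_loop (target i cnt res : Int) : Int × Int :=
  if i < target then
    x_y_sum_loop target (i + 1) (cnt + 1) (res + cnt)
  else (cnt, res)
termination_by (target - i).toNat
decreasing_by omega

def x_y_sum (row : Int) (col : Int) : Int :=
  if row = 1 ∧ col = 1 then 1
  else
    -- i, j, cnt, res = 1, 1, 1, 1; first while-loop; cnt += 1; second while-loop
    (x_y_sum_loop col 1 ((x_y_sum_loop row 1 1 1).1 + 1) (x_y_sum_loop row 1 1 1).2).2

-- ===== PORT B =====
def x_y_sum_alt (row : Int) (col : Int) : Int :=
  1 + PySem.Int.floordiv (row * (row - 1)) 2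
    + PySem.Int.floordiv ((col - 1) * (2 * row + col)) 2

-- ===== PRECONDITION & SPEC =====
-- Pre_ excludes exactly the inputs on which A's while-loops never terminate
-- (row < 1, or col < 1; A returns on no excluded input except row = col = 1,
-- which satisfies Pre_ anyway).
def Pre_x_y_sum (row : Int) (col : Int) : Prop := 1 ≤ row ∧ 1 ≤ col
instance (row : Int) (col : Int) : Decidable (Pre_x_y_sum row col) := by unfold Pre_x_y_sum; infer_instance
def pvWitness_x_y_sum : Int × Int := (3, 4)
def Spec_x_y_sum (row : Int) (col : Int) (out : Int) : Prop := out = x_y_sum_alt row col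
instance (row : Int) (col : Int) (out : Int) : Decidable (Spec_x_y_sum row col out) := by unfold Spec_x_y_sum; infer_instance

-- ===== CLAIM =====
def Claim_equal_x_y_sum : Prop := ∀ (row : Int) (col : Int), Dom_x_y_sum row col → Pre_x_y_sum row col → Spec_x_y_sum row col (x_y_sum row col)

-- ===== LEMMAS AND PROOFS =====

-- `n.choose 2` is the triangular number summed by each while-loop.
lemma cast_choose_two (n : Nat) : (n : Int) * ((n : Int) - 1) = 2 * ((n.choose 2 : Nat) : Int) := by
  cases n with
  | zero => simp
  | succ m =>
    have hd : 2 ∣ (m + 1) * m := by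
      rcases Nat.even_mul_succ_self m with ⟨k, hk⟩
      exact ⟨k, by rw [Nat.mul_comm]; omega⟩
    have h2 : 2 * ((m + 1).choose 2) = (m + 1) * m := by
      rw [Nat.choose_two_right]
      have h3 : (m + 1) * (m + 1 - 1) = (m + 1) * m := by simp
      rw [h3]; omega
    have h4 := congrArg (Nat.cast : Nat → Int) h2
    push_cast at h4 ⊢
    linear_combination -h4

lemma loop_eq (n : Nat) : ∀ (i cnt res : Int),
    x_y_sum_loop (i + n) i cnt res = (cnt + n, res + n * cnt + ((n.choose 2 : Nat) : Int)) := by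
  induction n with
  | zero =>
    intro i cnt res
    rw [x_y_sum_loop]
    simp
  | succ n ih =>
    intro i cnt res
    rw [x_y_sum_loop, if_pos (by push_cast; omega)]
    have harg : i + ((n : Nat) + 1 : Nat) = (i + 1) + (n : Nat) := by push_cast; ring
    rw [harg, ih]
    have h2 : ((n + 1).choose 2 : Nat) = (n.choose 2 : Nat) + n := by
      simp [Nat.choose_succ_succ, Nat.choose_one_right]
      omega
    simp only [Prod.mk.injEq, h2]
    constructor <;> push_cast <;> ring

lemma floordiv_two_mul (k : Int) : PySem.Int.floordiv (2 * k) 2 = k := by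
  rw [PySem.Int.floordiv_eq_ediv_of_pos (by omega)]
  omega

-- ===== VERDICT =====
theorem x_y_sum_spec : Claim_equal_x_y_sum := by
  intro row col _ hpre
  obtain ⟨hr, hc⟩ := hpre
  unfold Spec_x_y_sum x_y_sum x_y_sum_alt
  obtain ⟨r, hr1⟩ : ∃ r : Nat, row = 1 + (r : Int) := ⟨(row - 1).toNat, by omega⟩
  obtain ⟨c, hc1⟩ : ∃ c : Nat, col = 1 + (c : Int) := ⟨(col - 1).toNat, by omega⟩
  subst hr1 hc1
  have hA := loop_eq r 1 1 1
  have hB := loop_eq c 1 ((1 + (r : Int)) + 1) (1 + (r : Int) * 1 + ((r.choose 2 : Nat) : Int))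
  have hfr : (1 + (r : Int)) * ((1 + (r : Int)) - 1)
      = 2 * (((r.choose 2 : Nat) : Int) + r) := by
    linear_combination cast_choose_two r
  have hfc : ((1 + (c : Int)) - 1) * (2 * (1 + (r : Int)) + (1 + (c : Int)))
      = 2 * (((c.choose 2 : Nat) : Int) + (c : Int) * ((1 + (r : Int)) + 1)) := by
    linear_combination cast_choose_two c
  rw [hfr, hfc, floordiv_two_mul, floordiv_two_mul]
  split_ifs with h
  · obtain ⟨h1, h2⟩ := h
    have hr0 : r = 0 := by omega
    have hc0 : c = 0 := by omega
    subst hr0; subst hc0; simp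
  · rw [show (1 : Int) + (r : Int) = 1 + (r : Int) from rfl] at hA
    rw [hA]
    simp only
    rw [hB]
    push_cast
    ring
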